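-- pv_equiv track=rewrite | github.com/manhlamabc123/CC2Vec-JIT | jit_padding.py | clean_and_reformat_code
-- ===== SOURCE A (Python) =====
-- def clean_and_reformat_code(data):
--     # remove empty lines in code; divide code to two part: added_code and removed_code
--     new_diff_added_code, new_diff_removed_code = [], []
--     for diff in data:
--         files = []
--         for file in diff:
--             lines = file['added_code']
--             new_lines = [line for line in lines if len(line.strip()) > 0]
--             files.append(new_lines)
--         new_diff_added_code.append(files)
--     for diff in data:
--         files = []
--         for file in diff:
--             lines = file['removed_code']
--             new_lines = [line for line in lines if len(line.strip()) > 0]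
--             files.append(new_lines)
--         new_diff_removed_code.append(files)
--     return (new_diff_added_code, new_diff_removed_code)
-- ===== SOURCE B (Python) =====
-- def clean_and_reformat_code(data):
--     # recursive decomposition: process the first diff, recurse on the rest,
--     # and cons the per-diff results onto both outputs at once
--     if not data:
--         return ([], [])
--     diff, rest = data[0], data[1:]
--     added = [[l for l in f['added_code'] if l.strip()] for f in diff]
--     removed = [[l for l in f['removed_code'] if l.strip()] for f in diff]
--     added_rest, removed_rest = clean_and_reformat_code(rest)
--     return ([added] + added_rest, [removed] + removed_rest)
-- ===== Notes on version B (the rewrite author's own statement) =====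
-- stated objective: alternative
-- what changed: A makes two staged imperative append-loops over the whole structure; B is a structural recursion on data that handles one diff at a time (per-diff comprehensions producing both cleaned lists) and builds both outputs by consing onto the recursive result.
import Mathlib
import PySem

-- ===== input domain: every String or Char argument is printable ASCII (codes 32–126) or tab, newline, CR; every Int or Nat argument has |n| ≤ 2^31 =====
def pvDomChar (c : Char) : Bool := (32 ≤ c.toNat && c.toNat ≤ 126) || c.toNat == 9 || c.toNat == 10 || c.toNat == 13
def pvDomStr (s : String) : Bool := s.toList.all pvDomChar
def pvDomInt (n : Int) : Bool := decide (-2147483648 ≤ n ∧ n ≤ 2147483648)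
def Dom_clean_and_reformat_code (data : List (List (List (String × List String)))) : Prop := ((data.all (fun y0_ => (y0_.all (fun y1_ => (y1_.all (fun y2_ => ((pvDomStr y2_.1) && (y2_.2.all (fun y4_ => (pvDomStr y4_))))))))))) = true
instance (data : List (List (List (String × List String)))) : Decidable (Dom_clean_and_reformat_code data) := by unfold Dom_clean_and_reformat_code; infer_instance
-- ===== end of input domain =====

-- ===== PORT A =====
-- B replaces A's two staged imperative append-loops by one structural recursion on data.
-- shared by both ports: the filter 'line.strip() is nonempty' and the dict lookup file[key]
def pvKeep (line : String) : Bool := decide (0 < PySem.Str.len (PySem.Str.strip line))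

def pvLookup (file : List (String × List String)) (k : String) : List String :=
  ((PySem.Dict.mk file).get? k).getD []

def clean_and_reformat_code (data : List (List (List (String × List String)))) : List (List (List String)) × List (List (List String)) :=
  let added := data.foldl (fun acc diff =>
      acc ++ [diff.foldl (fun fs file => fs ++ [(pvLookup file "added_code").filter pvKeep]) []]) []
  let removed := data.foldl (fun acc diff =>
      acc ++ [diff.foldl (fun fs file => fs ++ [(pvLookup file "removed_code").filter pvKeep]) []]) []
  (added, removed)

-- ===== PORT B =====
def clean_and_reformat_code_alt (data : List (List (List (String × List String)))) : List (List (List String)) × List (List (List String)) :=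
  match data with
  | [] => ([], [])
  | diff :: rest =>
    let added := diff.map (fun f => (pvLookup f "added_code").filter pvKeep)
    let removed := diff.map (fun f => (pvLookup f "removed_code").filter pvKeep)
    let p := clean_and_reformat_code_alt rest
    ([added] ++ p.1, [removed] ++ p.2)

-- ===== PRECONDITION & SPEC =====
-- Pre_ excludes inputs where some file dict lacks the key 'added_code' or 'removed_code':
-- there Python A raises KeyError (and B does too).
def Pre_clean_and_reformat_code (data : List (List (List (String × List String)))) : Prop :=
  (data.all (fun diff => diff.all (fun file =>
      file.any (fun kv => kv.1 == "added_code") && file.any (fun kv => kv.1 == "removed_code")))) = true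
instance (data : List (List (List (String × List String)))) : Decidable (Pre_clean_and_reformat_code data) := by unfold Pre_clean_and_reformat_code; infer_instance
def pvWitness_clean_and_reformat_code : (List (List (List (String × List String)))) :=
  [[[("added_code", [" ", "a"]), ("removed_code", ["b"])]], []]

def Spec_clean_and_reformat_code (data : List (List (List (String × List String)))) (out : List (List (List String)) × List (List (List String))) : Prop := out = clean_and_reformat_code_alt data
instance (data : List (List (List (String × List String)))) (out : List (List (List String)) × List (List (List String))) : Decidable (Spec_clean_and_reformat_code data out) := by unfold Spec_clean_and_reformat_code; infer_instance

-- ===== CLAIM (what is proved, stated in full; the proofs are below) =====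
def Claim_equal_clean_and_reformat_code : Prop := ∀ (data : List (List (List (String × List String)))), Dom_clean_and_reformat_code data → Pre_clean_and_reformat_code data → Spec_clean_and_reformat_code data (clean_and_reformat_code data)

-- ===== LEMMAS AND PROOFS =====
-- append-in-loop fold is map
theorem pv_foldl_app {α β : Type} (f : α → β) (xs : List α) (acc : List β) :
    xs.foldl (fun a x => a ++ [f x]) acc = acc ++ xs.map f := by
  induction xs generalizing acc with
  | nil => simp
  | cons x xs ih => simp [List.foldl, ih]

-- B's recursion computes the two maps A's passes compute
theorem pv_alt_eq_maps (data : List (List (List (String × List String)))) :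
    clean_and_reformat_code_alt data =
      (data.map (fun diff => diff.map (fun f => (pvLookup f "added_code").filter pvKeep)),
       data.map (fun diff => diff.map (fun f => (pvLookup f "removed_code").filter pvKeep))) := by
  induction data with
  | nil => rfl
  | cons diff rest ih => simp [clean_and_reformat_code_alt, ih]

-- ===== VERDICT (by name: the statement is the Claim_ definition above) =====
theorem clean_and_reformat_code_spec : Claim_equal_clean_and_reformat_code := by
  intro data _ _
  unfold Spec_clean_and_reformat_code clean_and_reformat_code
  rw [pv_alt_eq_maps]
  simp only [pv_foldl_app, List.nil_append]
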